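-- pv_equiv track=rewrite | github.com/mkbabb/mdarray | tests/test2.py | min_letters
-- ===== SOURCE A (Python) =====
-- def min_letters(seq):
--     N = len(seq)
--     d = {}
--     for i in range(N):
--         seq_i = seq[i]
--         N_i = len(seq_i)
--         d_i = {}
--
--         for j in range(N_i):
--             seq_ij = seq_i[j]
--
--             if seq_ij not in d_i:
--                 d_i[seq_ij] = 1
--             else:
--                 d_i[seq_ij] += 1
--
--         for key, value in d_i.items():
--             if key not in d:
--                 d[key] = value
--             else:
--                 if d[key] < value:
--                     d[key] = value
--
--     return d
-- ===== SOURCE B (Python) =====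
-- def min_letters(seq):
--     # Key-major: collect the distinct elements in first-occurrence order,
--     # then take each key's maximum per-list count directly.
--     keys = dict.fromkeys(x for s in seq for x in s)
--     return {k: max(s.count(k) for s in seq) for k in keys}
-- ===== Notes on version B (the rewrite author's own statement) =====
-- stated objective: alternative
-- what changed: Replaced A's string-major pass (count each string into a per-string dict, then max-merge into the accumulator with branches) by a key-major two-phase algorithm: first collect the distinct elements in first-occurrence order with dict.fromkeys on the flattened sequence, then compute each key's value directly as max(s.count(k) for s in seq) with no intermediate dicts or merging.
import Mathlib
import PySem

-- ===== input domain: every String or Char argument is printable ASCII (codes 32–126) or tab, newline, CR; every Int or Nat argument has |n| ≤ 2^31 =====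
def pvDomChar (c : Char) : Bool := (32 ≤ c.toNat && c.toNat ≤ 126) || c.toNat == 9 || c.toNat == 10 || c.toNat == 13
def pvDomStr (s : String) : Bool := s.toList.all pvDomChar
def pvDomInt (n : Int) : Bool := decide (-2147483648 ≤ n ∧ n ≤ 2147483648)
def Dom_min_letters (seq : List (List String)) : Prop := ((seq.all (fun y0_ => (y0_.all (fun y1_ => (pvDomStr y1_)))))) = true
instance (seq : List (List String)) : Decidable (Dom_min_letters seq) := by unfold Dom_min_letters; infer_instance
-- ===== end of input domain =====

-- B replaces A's string-major counting + max-merge loops by a key-major two-phase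
-- algorithm: distinct keys in first-occurrence order, then each key's max per-list
-- count computed directly (objective: alternative, not faster).

-- ===== PORT A =====
def min_letters (seq : List (List String)) : List (String × Int) :=
  let N := PySem.List.len seq
  ((PySem.List.pyRange 0 N).foldl (fun d i =>
      let seq_i := PySem.List.pyGetD seq i []
      let N_i := PySem.List.len seq_i
      let d_i := (PySem.List.pyRange 0 N_i).foldl (fun d_i j =>
          let seq_ij := PySem.List.pyGetD seq_i j ""
          if d_i.contains seq_ij = false then d_i.insert seq_ij 1
          else d_i.insert seq_ij (d_i.getD seq_ij 0 + 1)) PySem.Dict.empty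
      d_i.items.foldl (fun d kv =>
          if d.contains kv.1 = false then d.insert kv.1 kv.2
          else if d.getD kv.1 0 < kv.2 then d.insert kv.1 kv.2
          else d) d)
    (PySem.Dict.empty : PySem.Dict String Int)).items

-- ===== PORT B =====
-- keys = dict.fromkeys(x for s in seq for x in s); {k: max(s.count(k) for s in seq) for k in keys}
-- (.getD 0 only makes Python's max of a nonempty generator total: a key exists only if seq ≠ [])
def min_letters_alt (seq : List (List String)) : List (String × Int) :=
  let keys := PySem.List.dedup (seq.flatMap (fun s => s))
  keys.map (fun k =>
    (k, (PySem.List.max? (seq.map (fun s => (PySem.List.count s k : Int))) (fun y => y)).getD 0))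

-- ===== PRECONDITION & SPEC =====
def Spec_min_letters (seq : List (List String)) (out : List (String × Int)) : Prop := out = min_letters_alt seq
instance (seq : List (List String)) (out : List (String × Int)) : Decidable (Spec_min_letters seq out) := by unfold Spec_min_letters; infer_instance

-- ===== CLAIM (what is proved, stated in full; the proofs are below) =====
def Claim_equal_min_letters : Prop := ∀ (seq : List (List String)), Dom_min_letters seq → Spec_min_letters seq (min_letters seq)

-- ===== LEMMAS AND PROOFS =====

theorem getD_mk_cons (k : String) (v : Int) (rest : List (String × Int)) (x : String) :
    (PySem.Dict.mk ((k, v) :: rest)).getD x 0 = if k = x then v else (PySem.Dict.mk rest).getD x 0 := by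
  rw [PySem.Dict.getD_eq_get?_getD, PySem.Dict.get?_mk_cons, PySem.Dict.getD_eq_get?_getD]
  by_cases h : k = x <;> simp [h]

theorem getD_mk_of_not_mem (rest : List (String × Int)) (k : String)
    (h : k ∉ rest.map Prod.fst) : (PySem.Dict.mk rest).getD k 0 = 0 := by
  apply PySem.Dict.getD_of_not_contains
  rw [PySem.Dict.contains_mk]
  simp only [List.any_eq_false]
  intro p hp hpk
  exact h (List.mem_map.mpr ⟨p, hp, by simpa using hpk⟩)

-- the inner counting loop builds Counter(seq_i)
theorem inner_count (s : List String) :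
    (PySem.List.pyRange 0 (PySem.List.len s)).foldl (fun d_i j =>
        let seq_ij := PySem.List.pyGetD s j ""
        if d_i.contains seq_ij = false then d_i.insert seq_ij 1
        else d_i.insert seq_ij (d_i.getD seq_ij 0 + 1)) PySem.Dict.empty
    = PySem.Dict.counter s := by
  have h := PySem.List.foldl_pyRange_zero_pyGetD s ""
      (fun (d_i : PySem.Dict String Int) (x : String) =>
          if d_i.contains x = false then d_i.insert x 1
          else d_i.insert x (d_i.getD x 0 + 1)) (PySem.Dict.empty : PySem.Dict String Int)
  refine h.trans ?_
  rw [← PySem.Dict.foldl_insert_getD_add_one_eq_counter]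
  congr 1
  funext d x
  by_cases hc : d.contains x
  · simp [hc]
  · have hf : d.contains x = false := by simpa using hc
    simp [hf, PySem.Dict.getD_of_not_contains d 0 hf]

-- one step of A's merge loop adds kv.1 to the key set
theorem merge_step_keys (d : PySem.Dict String Int) (kv : String × Int) :
    ((if d.contains kv.1 = false then d.insert kv.1 kv.2
      else if d.getD kv.1 0 < kv.2 then d.insert kv.1 kv.2
      else d)).keys = PySem.Set.add d.keys kv.1 := by
  by_cases hc : d.contains kv.1
  · have hmem : kv.1 ∈ d.keys := (PySem.Dict.contains_iff_mem_keys d kv.1).mp hc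
    rw [PySem.Set.add_of_mem hmem]
    simp only [hc]
    by_cases hlt : d.getD kv.1 0 < kv.2
    · simp [hlt, PySem.Dict.keys_insert_of_contains d kv.2 hc]
    · simp [hlt]
  · have hf : d.contains kv.1 = false := by simpa using hc
    have hnm : kv.1 ∉ d.keys := fun hmem => by
      rw [(PySem.Dict.contains_iff_mem_keys d kv.1).mpr hmem] at hf; simp at hf
    rw [PySem.Set.add_of_not_mem hnm, hf]
    simp [PySem.Dict.keys_insert_of_not_contains d kv.2 hf]

-- A's merge loop over a pair list: the keys become d.keys updated by the pair keys
theorem merge_keys (es : List (String × Int)) (d : PySem.Dict String Int) :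
    (es.foldl (fun d kv =>
        if d.contains kv.1 = false then d.insert kv.1 kv.2
        else if d.getD kv.1 0 < kv.2 then d.insert kv.1 kv.2
        else d) d).keys = PySem.Set.update d.keys (es.map Prod.fst) := by
  induction es generalizing d with
  | nil => simp [PySem.Set.update_nil]
  | cons kv rest ih =>
      simp only [List.foldl_cons, List.map_cons, PySem.Set.update_cons]
      rw [ih, merge_step_keys]

-- A's merge loop, pointwise: each key's value becomes the max of old and merged
theorem merge_getD (es : List (String × Int)) (d : PySem.Dict String Int) (k : String)
    (hnd : (es.map Prod.fst).Nodup) (hpos : ∀ p ∈ es, 0 ≤ p.2) (hd : 0 ≤ d.getD k 0) :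
    (es.foldl (fun d kv =>
        if d.contains kv.1 = false then d.insert kv.1 kv.2
        else if d.getD kv.1 0 < kv.2 then d.insert kv.1 kv.2
        else d) d).getD k 0 = max (d.getD k 0) ((PySem.Dict.mk es).getD k 0) := by
  induction es generalizing d with
  | nil =>
      have h0 : (PySem.Dict.mk ([] : List (String × Int))).getD k 0 = 0 :=
        getD_mk_of_not_mem [] k (by simp)
      simp only [List.foldl_nil, h0]
      omega
  | cons kv rest ih =>
      obtain ⟨k0, v0⟩ := kv
      simp only [List.map_cons, List.nodup_cons] at hnd
      obtain ⟨hk0, hrest⟩ := hnd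
      have hv0 : 0 ≤ v0 := by simpa using hpos (k0, v0) List.mem_cons_self
      simp only [List.foldl_cons]
      set d' := (if d.contains (k0, v0).1 = false then d.insert (k0, v0).1 (k0, v0).2
          else if d.getD (k0, v0).1 0 < (k0, v0).2 then d.insert (k0, v0).1 (k0, v0).2
          else d) with hd'
      have hstep : d'.getD k 0 = if k = k0 then max (d.getD k 0) v0 else d.getD k 0 := by
        rw [hd']
        simp only
        by_cases hk : k = k0
        · subst hk
          rw [if_pos rfl]
          by_cases h1 : d.contains k = false
          · rw [if_pos h1, PySem.Dict.getD_insert, if_pos rfl,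
                PySem.Dict.getD_of_not_contains d 0 h1]
            omega
          · rw [if_neg h1]
            by_cases h2 : d.getD k 0 < v0
            · rw [if_pos h2, PySem.Dict.getD_insert, if_pos rfl]
              omega
            · rw [if_neg h2]
              omega
        · rw [if_neg hk]
          by_cases h1 : d.contains k0 = false
          · rw [if_pos h1, PySem.Dict.getD_insert, if_neg hk]
          · rw [if_neg h1]
            by_cases h2 : d.getD k0 0 < v0
            · rw [if_pos h2, PySem.Dict.getD_insert, if_neg hk]
            · rw [if_neg h2]
      have hd'pos : 0 ≤ d'.getD k 0 := by
        rw [hstep]; split_ifs <;> omega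
      rw [ih d' hrest (fun p hp => hpos p (List.mem_cons_of_mem _ hp)) hd'pos, hstep,
          getD_mk_cons]
      by_cases hk : k = k0
      · subst hk
        rw [if_pos rfl, if_pos rfl,
            getD_mk_of_not_mem rest k hk0]
        omega
      · rw [if_neg hk, if_neg (fun h => hk h.symm)]

theorem mk_items (d : PySem.Dict String Int) : PySem.Dict.mk d.items = d := by
  apply PySem.Dict.ext; rfl

theorem counter_items_nonneg (s : List String) :
    ∀ p ∈ (PySem.Dict.counter s).items, 0 ≤ p.2 := by
  intro p hp
  rw [PySem.Dict.items_counter] at hp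
  obtain ⟨k, hk, rfl⟩ := List.mem_map.mp hp
  simp

theorem counter_keys_nodup (s : List String) :
    ((PySem.Dict.counter s).items.map Prod.fst).Nodup := by
  have h := PySem.Dict.nodup_keys_counter s
  simpa [PySem.Dict.keys] using h

theorem update_ofList (s : PySem.Set String) (b : List String) :
    PySem.Set.update s (PySem.Set.ofList b) = PySem.Set.update s b := by
  rw [PySem.Set.update_eq_append_filter, PySem.Set.update_eq_append_filter,
      PySem.Set.ofList_ofList]

-- the outer loop: keys and pointwise values of A's accumulator after the whole fold
theorem outer_fold (rest : List (List String)) (d : PySem.Dict String Int)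
    (hnd : d.keys.Nodup) (hpos : ∀ k, 0 ≤ d.getD k 0) :
    (rest.foldl (fun d s => (PySem.Dict.counter s).items.foldl (fun d kv =>
        if d.contains kv.1 = false then d.insert kv.1 kv.2
        else if d.getD kv.1 0 < kv.2 then d.insert kv.1 kv.2
        else d) d) d).keys = PySem.Set.update d.keys (rest.flatMap (fun s => s))
    ∧ ∀ k, (rest.foldl (fun d s => (PySem.Dict.counter s).items.foldl (fun d kv =>
        if d.contains kv.1 = false then d.insert kv.1 kv.2
        else if d.getD kv.1 0 < kv.2 then d.insert kv.1 kv.2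
        else d) d) d).getD k 0
      = rest.foldl (fun m s => max m ((PySem.List.count s k : Int))) (d.getD k 0) := by
  induction rest generalizing d with
  | nil => exact ⟨by simp [PySem.Set.update_nil], fun k => rfl⟩
  | cons s tail ih =>
      set d' := (PySem.Dict.counter s).items.foldl (fun d kv =>
          if d.contains kv.1 = false then d.insert kv.1 kv.2
          else if d.getD kv.1 0 < kv.2 then d.insert kv.1 kv.2
          else d) d with hd'
      have hkeys' : d'.keys = PySem.Set.update d.keys s := by
        rw [hd', merge_keys]
        have : (PySem.Dict.counter s).items.map Prod.fst = PySem.Set.ofList s := by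
          have h := PySem.Dict.keys_counter (κ := String) s
          simpa [PySem.Dict.keys] using h
        rw [this, update_ofList]
      have hget' : ∀ k, d'.getD k 0 = max (d.getD k 0) ((PySem.List.count s k : Int)) := by
        intro k
        rw [hd', merge_getD _ _ _ (counter_keys_nodup s) (counter_items_nonneg s) (hpos k),
            mk_items, PySem.Dict.getD_counter]
        simp [PySem.List.count_eq]
      have hnd' : d'.keys.Nodup := by
        rw [hkeys']; exact PySem.Set.nodup_update _ _ hnd
      have hpos' : ∀ k, 0 ≤ d'.getD k 0 := by
        intro k; rw [hget']; have := hpos k; omega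
      obtain ⟨ihk, ihg⟩ := ih d' hnd' hpos'
      constructor
      · simp only [List.foldl_cons, List.flatMap_cons]
        rw [← hd', ihk, hkeys', PySem.Set.update_append]
      · intro k
        simp only [List.foldl_cons]
        rw [← hd', ihg, hget']

-- ===== VERDICT (by name: the statement is the Claim_ definition above) =====
theorem min_letters_spec : Claim_equal_min_letters := by
  unfold Claim_equal_min_letters
  intro seq _
  unfold Spec_min_letters min_letters min_letters_alt
  have h1 := PySem.List.foldl_pyRange_zero_pyGetD seq []
      (fun d s => ((PySem.List.pyRange 0 (PySem.List.len s)).foldl (fun d_i j =>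
          let seq_ij := PySem.List.pyGetD s j ""
          if d_i.contains seq_ij = false then d_i.insert seq_ij 1
          else d_i.insert seq_ij (d_i.getD seq_ij 0 + 1)) PySem.Dict.empty).items.foldl
            (fun d kv =>
              if d.contains kv.1 = false then d.insert kv.1 kv.2
              else if d.getD kv.1 0 < kv.2 then d.insert kv.1 kv.2
              else d) d) (PySem.Dict.empty : PySem.Dict String Int)
  refine Eq.trans (congrArg PySem.Dict.items h1) ?_
  have hbody : (fun (d : PySem.Dict String Int) (s : List String) =>
      ((PySem.List.pyRange 0 (PySem.List.len s)).foldl (fun d_i j =>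
          let seq_ij := PySem.List.pyGetD s j ""
          if d_i.contains seq_ij = false then d_i.insert seq_ij 1
          else d_i.insert seq_ij (d_i.getD seq_ij 0 + 1)) PySem.Dict.empty).items.foldl
            (fun d kv =>
              if d.contains kv.1 = false then d.insert kv.1 kv.2
              else if d.getD kv.1 0 < kv.2 then d.insert kv.1 kv.2
              else d) d)
      = (fun (d : PySem.Dict String Int) (s : List String) =>
          (PySem.Dict.counter s).items.foldl (fun d kv =>
              if d.contains kv.1 = false then d.insert kv.1 kv.2
              else if d.getD kv.1 0 < kv.2 then d.insert kv.1 kv.2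
              else d) d) := by
    funext d s
    rw [inner_count s]
  rw [hbody]
  obtain ⟨hkeys, hget⟩ := outer_fold seq (PySem.Dict.empty : PySem.Dict String Int)
      (by rw [PySem.Dict.keys_empty]; exact List.nodup_nil) (fun k => by rw [PySem.Dict.getD_empty])
  set F := seq.foldl (fun d s => (PySem.Dict.counter s).items.foldl (fun d kv =>
      if d.contains kv.1 = false then d.insert kv.1 kv.2
      else if d.getD kv.1 0 < kv.2 then d.insert kv.1 kv.2
      else d) d) (PySem.Dict.empty : PySem.Dict String Int) with hF
  have hkeysF : F.keys = PySem.Set.ofList (seq.flatMap (fun s => s)) := by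
    rw [hkeys, PySem.Dict.keys_empty, PySem.Set.update_nil_left]
  have hndF : F.keys.Nodup := by rw [hkeysF]; exact PySem.Set.nodup_ofList _
  rw [PySem.Dict.items_eq_map_keys F hndF 0, hkeysF]
  simp only [PySem.List.dedup_eq_ofList]
  cases seq with
  | nil => rfl
  | cons s0 tail =>
      apply List.map_congr_left
      intro k _
      have hg := hget k
      have hE : (PySem.Dict.empty : PySem.Dict String Int).getD k 0 = 0 :=
        PySem.Dict.getD_empty k 0
      rw [hE] at hg
      refine Prod.ext rfl ?_
      show F.getD k 0 = _
      rw [hg]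
      simp only [List.map_cons, PySem.List.max?_id_cons, Option.getD_some, List.foldl_cons]
      have h0 : max (0 : Int) ((PySem.List.count s0 k : Int)) = (PySem.List.count s0 k : Int) := by
        simp [PySem.List.count_eq]
      rw [h0, List.foldl_map]
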